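-- pv_equiv track=rewrite | github.com/codezapper/chip8 | chip8.py | get_lines_representation
-- ===== SOURCE A (Python) =====
-- def get_lines_representation(hex_list):
--     lines = []
--     for n in hex_list:
--         s = ''
--         bit = 0x80
--         while bit > 0:
--             if n & bit:
--                 s += '*'
--             else:
--                 s += ' '
--             bit >>= 1
--         lines.append(s)
--
--     return lines
-- ===== SOURCE B (Python) =====
-- _TR = str.maketrans('01', ' *')
--
--
-- def get_lines_representation(hex_list):
--     return [format(n & 0xFF, '08b').translate(_TR) for n in hex_list]
-- ===== Notes on version B (the rewrite author's own statement) =====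
-- stated objective: idiomatic
-- what changed: Replaces A's explicit MSB-to-LSB bit-mask accumulation loop with library formatting of (n & 0xFF) as an 8-digit binary string followed by a character translation '1'->'*', '0'->' '.
import Mathlib
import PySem

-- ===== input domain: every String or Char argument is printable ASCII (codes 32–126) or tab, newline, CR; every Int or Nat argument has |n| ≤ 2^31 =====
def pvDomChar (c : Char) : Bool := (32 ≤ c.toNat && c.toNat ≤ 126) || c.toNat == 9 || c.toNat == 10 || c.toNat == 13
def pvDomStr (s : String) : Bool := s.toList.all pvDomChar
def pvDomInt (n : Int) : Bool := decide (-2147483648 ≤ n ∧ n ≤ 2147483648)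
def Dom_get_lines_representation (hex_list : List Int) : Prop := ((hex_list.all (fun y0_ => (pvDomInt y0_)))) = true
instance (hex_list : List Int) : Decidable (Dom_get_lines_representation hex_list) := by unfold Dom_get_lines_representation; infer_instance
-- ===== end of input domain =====

-- B replaces A's explicit MSB-to-LSB mask loop by formatting (n & 0xFF) as an 8-digit
-- binary string and translating '1'→'*', '0'→' ' (idiomatic; the byte work moves into library routines).

-- ===== PORT A =====
-- inner while loop: s accumulated as List Char; bit stays in {128,64,…,1,0}, so Nat is exact
def pvBitLoop (n : Int) (bit : Nat) (s : List Char) : List Char :=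
  if h : bit > 0 then
    pvBitLoop n (bit / 2) (s ++ [if PySem.Int.band n (bit : Int) ≠ 0 then '*' else ' '])
  else s
termination_by bit
decreasing_by omega

def get_lines_representation (hex_list : List Int) : List String :=
  hex_list.foldl (fun lines n => lines ++ [String.mk (pvBitLoop n 128 [])]) []

-- ===== PORT B =====
-- format(m, '08b') for 0 ≤ m < 256: the 8 binary digits, most significant first
def pvBin8 (m : Nat) : List Char :=
  (List.range 8).map (fun i => if m.testBit (7 - i) then '1' else '0')

-- str.translate(str.maketrans('01', ' *'))
def pvTr (c : Char) : Char := if c = '0' then ' ' else if c = '1' then '*' else c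

def get_lines_representation_alt (hex_list : List Int) : List String :=
  hex_list.map (fun n => String.mk ((pvBin8 ((PySem.Int.band n 255).toNat)).map pvTr))

-- ===== PRECONDITION & SPEC =====
def Spec_get_lines_representation (hex_list : List Int) (out : List String) : Prop := out = get_lines_representation_alt hex_list
instance (hex_list : List Int) (out : List String) : Decidable (Spec_get_lines_representation hex_list out) := by unfold Spec_get_lines_representation; infer_instance

-- ===== CLAIM (what is proved, stated in full; the proofs are below) =====
def Claim_equal_get_lines_representation : Prop := ∀ (hex_list : List Int), Dom_get_lines_representation hex_list → Spec_get_lines_representation hex_list (get_lines_representation hex_list)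

-- ===== LEMMAS AND PROOFS =====

lemma pv_bit255 (k : Nat) (hk : k < 8) : Nat.testBit 255 k = true := by
  interval_cases k <;> decide

set_option maxRecDepth 4000 in
lemma pv_sub_testBit : ∀ (r : Fin 256) (k : Fin 8),
    ((255 - r.val).testBit k.val) = !(r.val.testBit k.val) := by decide

lemma pv_bandBit (n : Int) (k : Nat) (hk : k < 8) :
    (PySem.Int.band n ((2 ^ k : Nat) : Int) ≠ 0) ↔
      ((PySem.Int.band n 255).toNat).testBit k = true := by
  cases n with
  | ofNat a =>
      have h1 : PySem.Int.band (Int.ofNat a) ((2 ^ k : Nat) : Int) = ((a &&& 2 ^ k : Nat) : Int) :=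
        PySem.Int.band_natCast a (2 ^ k)
      have h2 : PySem.Int.band (Int.ofNat a) 255 = ((a &&& 255 : Nat) : Int) := by
        have := PySem.Int.band_natCast a 255
        simpa using this
      rw [h1, h2]
      simp only [Int.toNat_natCast, Nat.testBit_land, pv_bit255 k hk, Bool.and_true, ne_eq,
        Int.natCast_eq_zero, Nat.and_two_pow]
      cases h : a.testBit k
      · simp [h, (Nat.two_pow_pos k).ne']
      · simp [h]
  | negSucc m =>
      have hneg : ¬ (0 ≤ Int.negSucc m) := by
        rw [Int.negSucc_not_nonneg]; exact id
      have hm1 : (-(Int.negSucc m) - 1) = (m : Int) := by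
        rw [Int.negSucc_eq]; ring
      have h1 : PySem.Int.band (Int.negSucc m) ((2 ^ k : Nat) : Int)
          = ((2 ^ k - (2 ^ k &&& m) : Nat) : Int) := by
        unfold PySem.Int.band
        rw [if_neg hneg, if_pos (Int.natCast_nonneg _), hm1]
        simp only [Int.toNat_natCast]
      have h2 : PySem.Int.band (Int.negSucc m) 255 = ((255 - (255 &&& m) : Nat) : Int) := by
        unfold PySem.Int.band
        rw [if_neg hneg, if_pos (by norm_num : (0:Int) ≤ 255), hm1]
        norm_num
        rfl
      rw [h1, h2]
      have hcomm1 : 2 ^ k &&& m = (m.testBit k).toNat * 2 ^ k := by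
        rw [Nat.land_comm, Nat.and_two_pow]
      have hcomm2 : 255 &&& m = m % 256 := by
        rw [Nat.land_comm]
        have := Nat.and_two_pow_sub_one_eq_mod m 8
        norm_num at this
        exact this
      have htb : m.testBit k = (m % 256).testBit k := by
        have := Nat.testBit_mod_two_pow m 8 k
        norm_num at this
        rw [this, decide_eq_true hk, Bool.true_and]
      have hr : m % 256 < 256 := Nat.mod_lt _ (by norm_num)
      have hsub : (255 - m % 256).testBit k = !(m % 256).testBit k :=
        pv_sub_testBit ⟨m % 256, hr⟩ ⟨k, hk⟩
      rw [hcomm1, hcomm2, htb]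
      simp only [Int.toNat_natCast, hsub]
      cases h : (m % 256).testBit k
      · simp [h, Int.natCast_eq_zero]
      · simp [h, Int.natCast_eq_zero, (Nat.two_pow_pos k).ne']

lemma pv_char (n : Int) (k : Nat) (b : Int) (hb : b = ((2 ^ k : Nat) : Int)) (hk : k < 8) :
    (if PySem.Int.band n b ≠ 0 then '*' else ' ')
      = pvTr (if ((PySem.Int.band n 255).toNat).testBit k then '1' else '0') := by
  subst hb
  by_cases hc : ((PySem.Int.band n 255).toNat).testBit k
  · have h1 : PySem.Int.band n ((2 ^ k : Nat) : Int) ≠ 0 := (pv_bandBit n k hk).mpr hc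
    have h1' : PySem.Int.band n ((2 : Int) ^ k) ≠ 0 := by push_cast at h1; exact h1
    simp [h1, h1', hc, pvTr]
  · have h1 : PySem.Int.band n ((2 ^ k : Nat) : Int) = 0 :=
      not_not.mp fun hne => hc ((pv_bandBit n k hk).mp hne)
    have h1' : PySem.Int.band n ((2 : Int) ^ k) = 0 := by push_cast at h1; exact h1
    simp [h1, h1', hc, pvTr]

lemma pv_loop_unfold (n : Int) : pvBitLoop n 128 [] =
    [if PySem.Int.band n 128 ≠ 0 then '*' else ' ',
     if PySem.Int.band n 64 ≠ 0 then '*' else ' ',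
     if PySem.Int.band n 32 ≠ 0 then '*' else ' ',
     if PySem.Int.band n 16 ≠ 0 then '*' else ' ',
     if PySem.Int.band n 8 ≠ 0 then '*' else ' ',
     if PySem.Int.band n 4 ≠ 0 then '*' else ' ',
     if PySem.Int.band n 2 ≠ 0 then '*' else ' ',
     if PySem.Int.band n 1 ≠ 0 then '*' else ' '] := by
  simp [pvBitLoop]

lemma pv_bin8_unfold (m : Nat) : pvBin8 m =
    [if m.testBit 7 then '1' else '0',
     if m.testBit 6 then '1' else '0',
     if m.testBit 5 then '1' else '0',
     if m.testBit 4 then '1' else '0',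
     if m.testBit 3 then '1' else '0',
     if m.testBit 2 then '1' else '0',
     if m.testBit 1 then '1' else '0',
     if m.testBit 0 then '1' else '0'] := by
  simp [pvBin8, List.range_succ]

lemma pv_row_eq (n : Int) :
    pvBitLoop n 128 [] = (pvBin8 ((PySem.Int.band n 255).toNat)).map pvTr := by
  rw [pv_loop_unfold, pv_bin8_unfold]
  simp only [List.map_cons, List.map_nil, List.cons.injEq, and_true]
  refine ⟨?_, ?_, ?_, ?_, ?_, ?_, ?_, ?_⟩
  · exact pv_char n 7 128 (by norm_num) (by norm_num)
  · exact pv_char n 6 64 (by norm_num) (by norm_num)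
  · exact pv_char n 5 32 (by norm_num) (by norm_num)
  · exact pv_char n 4 16 (by norm_num) (by norm_num)
  · exact pv_char n 3 8 (by norm_num) (by norm_num)
  · exact pv_char n 2 4 (by norm_num) (by norm_num)
  · exact pv_char n 1 2 (by norm_num) (by norm_num)
  · exact pv_char n 0 1 (by norm_num) (by norm_num)

lemma pv_fold_map (l : List Int) (acc : List String) :
    l.foldl (fun lines n => lines ++ [String.mk (pvBitLoop n 128 [])]) acc
      = acc ++ l.map (fun n => String.mk ((pvBin8 ((PySem.Int.band n 255).toNat)).map pvTr)) := by
  induction l generalizing acc with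
  | nil => simp
  | cons x xs ih => simp [ih, pv_row_eq x]

-- ===== VERDICT (by name: the statement is the Claim_ definition above) =====
theorem get_lines_representation_spec : Claim_equal_get_lines_representation := by
  intro l _
  unfold Spec_get_lines_representation get_lines_representation get_lines_representation_alt
  simpa using pv_fold_map l []
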